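-- pv_equiv track=rewrite | github.com/Hanseltu/trace-work | combinationweek-modify-diversity.py | kuohao
-- ===== SOURCE A (Python) =====
-- def kuohao(s):
-- 	location = 0
-- 	a = []
-- 	mark = []
-- 	inlineword = ''
-- 	for i in range(len(s)):
-- 		if s[i] != ")":
-- 			a.append(s[i])
-- 			if s[i] == "(":
-- 				mark.append(s[i])
-- 		else:
-- 			if mark and len(mark)!= 1:
-- 				for j in range(len(a)-1, -1, -1):
-- 					if a[j] != '(':
-- 						a.pop()
-- 					else:
-- 						a.pop()
-- 						mark.pop()
-- 						break
-- 			else: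
-- 				return ''.join(a)
-- ===== SOURCE B (Python) =====
-- def kuohao(s):
--     a = []
--     opens = []
--     for ch in s:
--         if ch != ')':
--             if ch == '(':
--                 opens.append(len(a))
--             a.append(ch)
--         else:
--             if len(opens) >= 2:
--                 idx = opens.pop()
--                 del a[idx:]
--             else:
--                 return ''.join(a)
--     return None
-- ===== Notes on version B (the rewrite author's own statement) =====
-- stated objective: simpler
-- what changed: Replaces A's mark-list of '(' characters and its inner backwards pop-one-character-at-a-time scan by a stack of indices where '(' was placed, so a ')' at depth >= 2 is handled by one truncation del a[idx:] instead of an inner loop.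
import Mathlib
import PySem

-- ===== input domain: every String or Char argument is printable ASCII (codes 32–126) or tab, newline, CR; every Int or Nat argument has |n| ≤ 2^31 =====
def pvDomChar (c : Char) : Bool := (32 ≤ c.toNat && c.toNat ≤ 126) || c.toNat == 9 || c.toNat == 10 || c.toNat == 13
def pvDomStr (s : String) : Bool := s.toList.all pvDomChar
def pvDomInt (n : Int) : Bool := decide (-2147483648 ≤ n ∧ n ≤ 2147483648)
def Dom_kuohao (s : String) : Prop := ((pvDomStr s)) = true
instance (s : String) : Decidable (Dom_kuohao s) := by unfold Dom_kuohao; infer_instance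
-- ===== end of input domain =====

-- B replaces A's inner backwards pop-one-at-a-time scan by a stack of '('-indices and a
-- single truncation (objective: simpler control flow; equal asymptotic cost).

-- ===== PORT A =====
-- A's inner `for j in range(len(a)-1,-1,-1)` loop, run on a.reverse: pops chars until it
-- pops a '('; the Bool records whether the break (and hence mark.pop) happened.
def kuohaoInnerA : List Char → List Char × Bool
  | [] => ([], false)
  | c :: rest => if c ≠ '(' then kuohaoInnerA rest else (rest, true)

def kuohaoGoA : List Char → List Char → List Char → Option String
  | [], _, _ => none
  | c :: rest, a, mark =>
    if c ≠ ')' then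
      kuohaoGoA rest (a ++ [c]) (if c = '(' then mark ++ [c] else mark)
    else
      if mark ≠ [] ∧ mark.length ≠ 1 then
        let p := kuohaoInnerA a.reverse
        kuohaoGoA rest p.1.reverse (if p.2 then mark.dropLast else mark)
      else some (String.ofList a)

def kuohao (s : String) : Option String := kuohaoGoA s.toList [] []

-- ===== PORT B =====
def kuohaoGoB : List Char → List Char → List Nat → Option String
  | [], _, _ => none
  | c :: rest, a, opens =>
    if c ≠ ')' then
      kuohaoGoB rest (a ++ [c]) (if c = '(' then opens ++ [a.length] else opens)
    else
      if opens.length ≥ 2 then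
        kuohaoGoB rest (a.take (opens.getLast?.getD 0)) opens.dropLast
      else some (String.ofList a)

def kuohao_alt (s : String) : Option String := kuohaoGoB s.toList [] []

-- ===== PRECONDITION & SPEC =====
def Spec_kuohao (s : String) (out : Option String) : Prop := out = kuohao_alt s
instance (s : String) (out : Option String) : Decidable (Spec_kuohao s out) := by unfold Spec_kuohao; infer_instance

-- ===== CLAIM (what is proved, stated in full; the proofs are below) =====
def Claim_equal_kuohao : Prop := ∀ (s : String), Dom_kuohao s → Spec_kuohao s (kuohao s)

-- ===== LEMMAS AND PROOFS =====

-- Invariant: `opens` (read top-first, i.e. reversed) decomposes `a` into nested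
-- '('-prefixed segments; the part after the last '(' contains no '('.
def kuohaoInv : List Char → List Nat → Prop
  | a, [] => '(' ∉ a
  | a, idx :: rest => ∃ u t, a = u ++ '(' :: t ∧ u.length = idx ∧ '(' ∉ t ∧ kuohaoInv u rest

lemma kuohaoInnerA_found (w : List Char) (hw : '(' ∉ w) (r : List Char) :
    kuohaoInnerA (w ++ '(' :: r) = (r, true) := by
  induction w with
  | nil => simp [kuohaoInnerA]
  | cons c cs ih =>
    have hc : c ≠ '(' := fun h => hw (by simp [h])
    simp only [List.cons_append, kuohaoInnerA, if_pos hc]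
    exact ih (fun h => hw (by simp [h]))

lemma kuohaoInv_append (a : List Char) (r : List Nat) (c : Char) (hc : c ≠ '(') :
    kuohaoInv a r → kuohaoInv (a ++ [c]) r := by
  cases r with
  | nil =>
    intro h
    simp only [kuohaoInv, List.mem_append, List.mem_singleton] at *
    rintro (h1 | h1)
    · exact h h1
    · exact hc h1.symm
  | cons idx rest =>
    rintro ⟨u, t, rfl, hl, ht, hi⟩
    refine ⟨u, t ++ [c], by simp, hl, ?_, hi⟩
    simp only [List.mem_append, List.mem_singleton]
    rintro (h1 | h1)
    · exact ht h1
    · exact hc h1.symm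

lemma kuohaoGo_eq (cs : List Char) : ∀ (a mark : List Char) (opens : List Nat),
    mark.length = opens.length → kuohaoInv a opens.reverse →
    kuohaoGoA cs a mark = kuohaoGoB cs a opens := by
  induction cs with
  | nil => intro a mark opens _ _; rfl
  | cons c rest ih =>
    intro a mark opens hlen hinv
    by_cases hc : c = ')'
    · subst hc
      simp only [kuohaoGoA, kuohaoGoB, if_neg (by simp : ¬ (')' ≠ ')'))]
      by_cases h2 : opens.length ≥ 2
      · have hm : mark ≠ [] ∧ mark.length ≠ 1 := by
          constructor
          · intro h; rw [h] at hlen; simp at hlen; omega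
          · omega
        rw [if_pos hm, if_pos h2]
        obtain ⟨os, idx, rfl⟩ := opens.eq_nil_or_concat.resolve_left
          (by intro h; subst h; simp at h2)
        rw [List.concat_eq_append] at hlen hinv h2 ⊢
        rw [List.reverse_append] at hinv
        simp only [List.reverse_cons, List.reverse_nil, List.nil_append, List.singleton_append] at hinv
        obtain ⟨u, t, rfl, hul, ht, hi⟩ := hinv
        have hrev : (u ++ '(' :: t).reverse = t.reverse ++ '(' :: u.reverse := by
          simp [List.reverse_append]
        have hfound := kuohaoInnerA_found t.reverse (by simpa using ht) u.reverse
        have htake : (u ++ '(' :: t).take ((os ++ [idx]).getLast?.getD 0) = u := by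
          have h : (os ++ [idx]).getLast? = some idx := List.getLast?_concat
          rw [h, Option.getD_some, ← hul, List.take_left]
        rw [hrev, hfound]
        simp only [List.reverse_reverse, htake, List.dropLast_concat]
        apply ih
        · simp at hlen ⊢; omega
        · have : u.length = idx := hul
          exact hi
      · have hm : ¬ (mark ≠ [] ∧ mark.length ≠ 1) := by
          rintro ⟨h1, h3⟩
          have : mark.length ≠ 0 := by simpa [List.length_eq_zero_iff] using h1
          omega
        rw [if_neg hm, if_neg h2]
    · rw [kuohaoGoA, kuohaoGoB, if_pos hc, if_pos hc]
      by_cases hp : c = '('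
      · subst hp
        apply ih
        · simp [hlen]
        · have h : kuohaoInv (a ++ ['(']) (a.length :: opens.reverse) :=
            ⟨a, [], by simp, rfl, by simp, hinv⟩
          simpa using h
      · simp only [if_neg hp]
        exact ih _ _ _ hlen (kuohaoInv_append a opens.reverse c hp hinv)

-- ===== VERDICT (by name: the statement is the Claim_ definition above) =====
theorem kuohao_spec : Claim_equal_kuohao := by
  intro s _
  unfold Spec_kuohao kuohao kuohao_alt
  exact kuohaoGo_eq s.toList [] [] [] rfl (by simp [kuohaoInv])
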